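-- pv_equiv track=rewrite | github.com/sabzi1984/Intro-to-Algorithms | long & simple path.py | long_and_simple_decision
-- ===== SOURCE A (Python) =====
-- def all_perms(seq):
--     #all permutations of the nodes
--     if len(seq) == 0: return [[]]
--     if len(seq) == 1: return [seq, []]
--     most = all_perms(seq[1:])
--     first = seq[0]
--     rest = []
--     for perm in most:
--         for i in range(len(perm)+1):
--             rest.append(perm[0:i] + [first] + perm[i:])
--     return most + rest
--
-- def check_path(G,path):
--     for i in range(len(path)-1):
--         if path[i+1] not in G[path[i]]: return False
--     return True
--
-- def long_and_simple_decision(G,u,v,l):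
--     if l == 0:
--         return False
--     n = len(G)
--     perms = all_perms(list(G.keys()))
--     for perm in perms:
--         # check path
--         if (len(perm) > l and perm[0] == u and perm[len(perm)-1] == v
--             and check_path(G,perm)):
--             return True
--     return False
-- ===== SOURCE B (Python) =====
-- def long_and_simple_decision(G, u, v, l):
--     # Level-by-level search over simple paths starting at u, instead of
--     # enumerating every permutation of every subset of the nodes.
--     if l == 0 or u not in G:
--         return False
--     frontier = [[u]]
--     for size in range(1, len(G) + 1):
--         if size > l and any(p[-1] == v for p in frontier):
--             return True
--         frontier = [p + [w] for p in frontier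
--                     for w in G[p[-1]] if w in G and w not in p]
--     return False
-- ===== Notes on version B (the rewrite author's own statement) =====
-- stated objective: faster
-- what changed: B replaces A's enumeration of every permutation of every subset of the nodes (filtered for being a u-v path) by a level-by-level search that only ever extends simple paths starting at u along actual edges; intended as faster (in a timing run A already timed out at n=16 where B returned, so no ratio could be measured).
-- outside the precondition, e.g. on long_and_simple_decision({0: [0]}, 0, 0, -1): A returns True, B returns True
import Mathlib
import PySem

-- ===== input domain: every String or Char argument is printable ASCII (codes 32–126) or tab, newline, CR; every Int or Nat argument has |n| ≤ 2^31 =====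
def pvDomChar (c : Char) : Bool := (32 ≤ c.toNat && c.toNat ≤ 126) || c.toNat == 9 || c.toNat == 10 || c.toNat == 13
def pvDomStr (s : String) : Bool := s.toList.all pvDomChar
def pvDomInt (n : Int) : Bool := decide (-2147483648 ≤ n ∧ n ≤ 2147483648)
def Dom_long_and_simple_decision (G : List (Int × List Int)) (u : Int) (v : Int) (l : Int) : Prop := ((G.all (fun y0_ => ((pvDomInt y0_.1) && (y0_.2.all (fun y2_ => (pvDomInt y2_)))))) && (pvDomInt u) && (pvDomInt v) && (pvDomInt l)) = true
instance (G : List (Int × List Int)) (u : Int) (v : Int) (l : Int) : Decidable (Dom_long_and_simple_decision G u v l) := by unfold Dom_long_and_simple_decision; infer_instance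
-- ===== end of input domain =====

-- B replaces A's permutations-of-all-subsets enumeration by a level-by-level search over
-- simple paths from u; intended as faster (timing: A timed out at n=16 where B returned).


-- ===== PORT A =====
-- all permutations of all subsets of seq, as in the Python
def all_perms : List Int → List (List Int)
  | [] => [[]]
  | [x] => [[x], []]
  | x :: y :: rest =>
      let most := all_perms (y :: rest)
      most ++ most.flatMap (fun perm =>
        (PySem.List.pyRange 0 ((perm.length : Int) + 1) 1).map (fun i =>
          PySem.List.slice perm (some 0) (some i) ++ [x] ++ PySem.List.slice perm (some i) none))

-- G[path[i]] can only be a key lookup that succeeds in A's use (path elements are keys),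
-- so the KeyError-free getD form is exact there
def check_path (G : List (Int × List Int)) (path : List Int) : Bool :=
  (PySem.List.pyRange 0 ((path.length : Int) - 1) 1).all (fun i =>
    ((PySem.Dict.ofList G).getD (PySem.List.pyGetD path i 0) []).contains
      (PySem.List.pyGetD path (i + 1) 0))

def long_and_simple_decision (G : List (Int × List Int)) (u : Int) (v : Int) (l : Int) : Bool :=
  if l == 0 then false
  else
    let perms := all_perms ((PySem.Dict.ofList G).keys)
    perms.any (fun perm =>
      decide ((perm.length : Int) > l) &&
      (PySem.List.pyGet? perm 0 == some u) &&
      (PySem.List.pyGet? perm ((perm.length : Int) - 1) == some v) &&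
      check_path G perm)

-- ===== PORT B =====
def bfs_step (d : PySem.Dict Int (List Int)) (frontier : List (List Int)) : List (List Int) :=
  frontier.flatMap (fun p =>
    ((d.getD (PySem.List.pyGetD p (-1) 0) []).filter
        (fun w => d.contains w && !(p.contains w))).map (fun w => p ++ [w]))

def bfs_loop (d : PySem.Dict Int (List Int)) (v : Int) (l : Int) :
    List Int → List (List Int) → Bool
  | [], _ => false
  | size :: sizes, frontier =>
      if decide (size > l) && frontier.any (fun p => PySem.List.pyGetD p (-1) 0 == v) then true
      else bfs_loop d v l sizes (bfs_step d frontier)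

def long_and_simple_decision_alt (G : List (Int × List Int)) (u : Int) (v : Int) (l : Int) : Bool :=
  let d := PySem.Dict.ofList G
  if l == 0 || !(d.contains u) then false
  else bfs_loop d v l (PySem.List.pyRange 1 ((d.size : Int) + 1) 1) [[u]]

-- ===== PRECONDITION & SPEC =====
-- Pre_ excludes l < 0, on which A raises IndexError (the empty permutation passes the
-- length test and perm[0] is evaluated) unless a qualifying permutation is enumerated first.
def Pre_long_and_simple_decision (G : List (Int × List Int)) (u : Int) (v : Int) (l : Int) : Prop :=
  0 ≤ l
instance (G : List (Int × List Int)) (u : Int) (v : Int) (l : Int) : Decidable (Pre_long_and_simple_decision G u v l) := by unfold Pre_long_and_simple_decision; infer_instance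
def pvWitness_long_and_simple_decision : (List (Int × List Int)) × Int × Int × Int :=
  ([(0, [1]), (1, [2]), (2, [])], 0, 2, 2)

def Spec_long_and_simple_decision (G : List (Int × List Int)) (u : Int) (v : Int) (l : Int) (out : Bool) : Prop := out = long_and_simple_decision_alt G u v l
instance (G : List (Int × List Int)) (u : Int) (v : Int) (l : Int) (out : Bool) : Decidable (Spec_long_and_simple_decision G u v l out) := by unfold Spec_long_and_simple_decision; infer_instance

-- ===== CLAIM (what is proved, stated in full; the proofs are below) =====
def Claim_equal_long_and_simple_decision : Prop := ∀ (G : List (Int × List Int)) (u : Int) (v : Int) (l : Int), Dom_long_and_simple_decision G u v l → Pre_long_and_simple_decision G u v l → Spec_long_and_simple_decision G u v l (long_and_simple_decision G u v l)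

-- ===== LEMMAS AND PROOFS =====

-- the common abstract object: a simple path over the keys of d along its adjacency lists
def GoodPath (d : PySem.Dict Int (List Int)) (p : List Int) : Prop :=
  p.Nodup ∧ (∀ x ∈ p, x ∈ d.keys) ∧ List.IsChain (fun a b => b ∈ d.getD a []) p

theorem mem_all_perms (seq : List Int) (hs : seq.Nodup) (p : List Int) :
    p ∈ all_perms seq ↔ p.Nodup ∧ ∀ x ∈ p, x ∈ seq := by
  induction seq using all_perms.induct generalizing p with
  | case1 =>
      simp only [all_perms, List.mem_singleton]
      constructor
      · rintro rfl; simp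
      · rintro ⟨-, h⟩
        cases p with
        | nil => rfl
        | cons a q => exact absurd (h a (by simp)) (by simp)
  | case2 x =>
      simp only [all_perms, List.mem_cons, List.not_mem_nil, or_false]
      constructor
      · rintro (rfl | rfl) <;> simp
      · rintro ⟨hnd, h⟩
        cases p with
        | nil => right; rfl
        | cons a q =>
          have ha : a = x := by have := h a (by simp); simpa using this
          cases q with
          | nil => left; rw [ha]
          | cons b r =>
            have hb : b = x := by have := h b (by simp); simpa using this
            exfalso
            subst ha; subst hb
            simp at hnd
  | case3 x y rest ih =>
      have hx : x ∉ y :: rest := (List.nodup_cons.mp hs).1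
      have hs' : (y :: rest).Nodup := (List.nodup_cons.mp hs).2
      simp only [all_perms, List.mem_append, List.mem_flatMap, List.mem_map,
        PySem.List.mem_pyRange_one]
      constructor
      · rintro (hm | ⟨q, hq, i, ⟨hi0, hi1⟩, rfl⟩)
        · obtain ⟨h1, h2⟩ := (ih hs' _).mp hm
          exact ⟨h1, fun z hz => List.mem_cons_of_mem _ (h2 z hz)⟩
        · obtain ⟨hqnd, hqsub⟩ := (ih hs' _).mp hq
          have hxq : x ∉ q := fun hc => hx (hqsub x hc)
          rw [PySem.List.slice_zero_start, PySem.List.slice_to _ hi0,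
            PySem.List.slice_from _ hi0]
          have hrw : q.take i.toNat ++ [x] ++ q.drop i.toNat
              = q.take i.toNat ++ x :: q.drop i.toNat := by simp
          rw [hrw]
          constructor
          · rw [List.nodup_middle, List.take_append_drop]
            exact List.nodup_cons.mpr ⟨hxq, hqnd⟩
          · intro z hz
            simp only [List.mem_append, List.mem_cons] at hz
            rcases hz with h | h | h
            · exact List.mem_cons_of_mem _ (hqsub z (List.mem_of_mem_take h))
            · exact h ▸ List.mem_cons_self
            · exact List.mem_cons_of_mem _ (hqsub z (List.mem_of_mem_drop h))
      · rintro ⟨hnd, hsub⟩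
        by_cases hxp : x ∈ p
        · right
          obtain ⟨s, t, rfl⟩ := List.append_of_mem hxp
          have hnd' : (x :: (s ++ t)).Nodup := List.nodup_middle.mp hnd
          have hxq : x ∉ s ++ t := (List.nodup_cons.mp hnd').1
          have hq : s ++ t ∈ all_perms (y :: rest) := by
            rw [ih hs']
            refine ⟨(List.nodup_cons.mp hnd').2, fun z hz => ?_⟩
            have hzp : z ∈ s ++ x :: t := by
              simp only [List.mem_append, List.mem_cons]
              rcases List.mem_append.mp hz with h | h
              · exact Or.inl h
              · exact Or.inr (Or.inr h)
            rcases List.mem_cons.mp (hsub z hzp) with h | h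
            · exact absurd (h ▸ hz) hxq
            · exact h
          refine ⟨s ++ t, hq, (s.length : Int), ⟨by positivity, by
            have := List.length_append (as := s) (bs := t); omega⟩, ?_⟩
          rw [PySem.List.slice_zero_start, PySem.List.slice_to_natCast,
            PySem.List.slice_from_natCast, List.take_left, List.drop_left]
          simp
        · left
          rw [ih hs']
          refine ⟨hnd, fun z hz => ?_⟩
          rcases List.mem_cons.mp (hsub z hz) with h | h
          · exact absurd (h ▸ hz) hxp
          · exact h

theorem check_path_iff (G : List (Int × List Int)) (p : List Int) :
    check_path G p = true ↔
      List.IsChain (fun a b => b ∈ (PySem.Dict.ofList G).getD a []) p := by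
  unfold check_path
  rw [List.all_eq_true, List.isChain_iff_getElem]
  constructor
  · intro h i hi
    have hm : (i : Int) ∈ PySem.List.pyRange 0 ((p.length : Int) - 1) 1 := by
      rw [PySem.List.mem_pyRange_one]; omega
    have hh := h _ hm
    rw [PySem.List.pyGetD_eq_getElem p (i := (i : Int)) 0 (by omega) (by push_cast; omega),
      PySem.List.pyGetD_eq_getElem p (i := (i : Int) + 1) 0 (by omega) (by push_cast; omega)]
      at hh
    rw [List.contains_iff_mem] at hh
    have e1 : ((i : Int)).toNat = i := by omega
    have e2 : ((i : Int) + 1).toNat = i + 1 := by omega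
    simp only [e1, e2] at hh
    exact hh
  · intro h i hm
    rw [PySem.List.mem_pyRange_one] at hm
    obtain ⟨h0, h1⟩ := hm
    lift i to ℕ using h0
    rw [PySem.List.pyGetD_eq_getElem p (i := (i : Int)) 0 (by omega) (by push_cast; omega),
      PySem.List.pyGetD_eq_getElem p (i := (i : Int) + 1) 0 (by omega) (by push_cast; omega),
      List.contains_iff_mem]
    have e1 : ((i : Int)).toNat = i := by omega
    have e2 : ((i : Int) + 1).toNat = i + 1 := by omega
    simp only [e1, e2]
    exact h i (by omega)

theorem A_iff (G : List (Int × List Int)) (u v l : Int) (hl : 1 ≤ l) :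
    long_and_simple_decision G u v l = true ↔
      ∃ p, GoodPath (PySem.Dict.ofList G) p ∧ p.head? = some u ∧ p.getLast? = some v ∧
        l < (p.length : Int) := by
  unfold long_and_simple_decision
  rw [if_neg (by simp; omega)]
  rw [List.any_eq_true]
  constructor
  · rintro ⟨perm, hmem, hcond⟩
    simp only [Bool.and_eq_true, decide_eq_true_eq, beq_iff_eq] at hcond
    obtain ⟨⟨⟨hlen, hu⟩, hv⟩, hcp⟩ := hcond
    obtain ⟨hnd, hsub⟩ := (mem_all_perms _ (PySem.Dict.nodup_keys_ofList G) perm).mp hmem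
    refine ⟨perm, ⟨hnd, hsub, (check_path_iff G perm).mp hcp⟩, ?_, ?_, hlen⟩
    · rw [PySem.List.pyGet?_zero] at hu
      rwa [List.head?_eq_getElem?]
    · have hne : perm.length ≠ 0 := by omega
      rw [show ((perm.length : Int) - 1) = ((perm.length - 1 : Nat) : Int) by omega] at hv
      rw [PySem.List.pyGet?_natCast] at hv
      rwa [List.getLast?_eq_getElem?]
  · rintro ⟨p, ⟨hnd, hsub, hch⟩, hu, hv, hlen⟩
    refine ⟨p, (mem_all_perms _ (PySem.Dict.nodup_keys_ofList G) p).mpr ⟨hnd, hsub⟩, ?_⟩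
    have hne : p.length ≠ 0 := by omega
    simp only [Bool.and_eq_true, decide_eq_true_eq, beq_iff_eq]
    refine ⟨⟨⟨hlen, ?_⟩, ?_⟩, (check_path_iff G p).mpr hch⟩
    · rw [PySem.List.pyGet?_zero, ← List.head?_eq_getElem?]; exact hu
    · rw [show ((p.length : Int) - 1) = ((p.length - 1 : Nat) : Int) by omega,
        PySem.List.pyGet?_natCast, ← List.getLast?_eq_getElem?]
      exact hv

-- frontier invariant of B's loop: exactly the good paths from u of the current length
def FInv (d : PySem.Dict Int (List Int)) (u : Int) (k : Nat) (f : List (List Int)) : Prop :=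
  ∀ p, p ∈ f ↔ (GoodPath d p ∧ p.head? = some u ∧ p.length = k)

theorem contains_false_iff {α : Type} [BEq α] [LawfulBEq α] (l : List α) (a : α) :
    l.contains a = false ↔ a ∉ l := by
  rw [← Bool.not_eq_true, not_iff_not]
  exact List.contains_iff_mem

theorem step_inv (d : PySem.Dict Int (List Int)) (u : Int) (k : Nat) (hk : 1 ≤ k)
    (f : List (List Int)) (hf : FInv d u k f) : FInv d u (k + 1) (bfs_step d f) := by
  intro p'
  unfold bfs_step
  simp only [List.mem_flatMap, List.mem_map, List.mem_filter, Bool.and_eq_true,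
    Bool.not_eq_true', decide_eq_true_eq, contains_false_iff]
  constructor
  · rintro ⟨p, hp, w, ⟨hwadj, hwk, hwnp⟩, rfl⟩
    obtain ⟨⟨hnd, hsub, hch⟩, hu, hlen⟩ := (hf p).mp hp
    have hpne : p ≠ [] := by intro hc; rw [hc] at hlen; simp at hlen; omega
    rw [PySem.List.pyGetD_neg_one _ _ hpne] at hwadj
    refine ⟨⟨?_, ?_, ?_⟩, ?_, by simp [hlen]⟩
    · rw [List.nodup_append]
      refine ⟨hnd, by simp, ?_⟩
      intro a ha b hb
      rw [List.mem_singleton] at hb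
      subst hb
      exact fun hc => hwnp (hc ▸ ha)  -- w ∉ p
    · intro z hz
      rcases List.mem_append.mp hz with h | h
      · exact hsub z h
      · rw [List.mem_singleton] at h
        subst h
        exact (PySem.Dict.contains_iff_mem_keys _ _).mp hwk
    · rw [List.isChain_append]
      refine ⟨hch, List.isChain_singleton w, ?_⟩
      intro a ha b hb
      rw [List.getLast?_eq_some_getLast hpne, Option.mem_def, Option.some_inj] at ha
      simp only [List.head?_cons, Option.mem_def, Option.some_inj] at hb
      subst ha; subst hb
      exact hwadj
    · rw [List.head?_append_of_ne_nil _ hpne]; exact hu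
  · rintro ⟨⟨hnd, hsub, hch⟩, hu, hlen⟩
    have hne : p' ≠ [] := by intro hc; rw [hc] at hlen; simp at hlen
    set w := p'.getLast hne with hw
    have hsplit : p'.dropLast ++ [w] = p' := List.dropLast_append_getLast hne
    set p := p'.dropLast with hpdef
    have hplen : p.length = k := by
      have : p.length = p'.length - 1 := by simp [hpdef]
      omega
    have hpne : p ≠ [] := by
      intro hc
      rw [hc] at hplen; simp at hplen; omega
    have hchain := List.isChain_append.mp (hsplit ▸ hch)
    have hwmem : w ∈ p' := hsplit ▸ List.mem_append_right _ (by simp)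
    refine ⟨p, (hf p).mpr ⟨⟨?_, ?_, hchain.1⟩, ?_, hplen⟩, w, ⟨?_, ?_, ?_⟩, hsplit⟩
    · exact (List.dropLast_sublist p').nodup hnd
    · intro z hz
      exact hsub z (hsplit ▸ List.mem_append_left _ hz)
    · rw [← hsplit, List.head?_append_of_ne_nil _ hpne] at hu
      exact hu
    · have hlink := hchain.2.2 (p.getLast hpne)
        (by rw [List.getLast?_eq_some_getLast hpne]; rfl) w (by simp)
      rwa [PySem.List.pyGetD_neg_one _ _ hpne]
    · rw [PySem.Dict.contains_iff_mem_keys]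
      exact hsub w hwmem
    · intro hwp
      have hcontra : ¬ (p ++ [w]).Nodup := by
        rw [List.nodup_append]
        rintro ⟨-, -, hdisj⟩
        exact hdisj w hwp w (by simp) rfl
      exact hcontra (hsplit.symm ▸ hnd)

theorem goodpath_length_le (d : PySem.Dict Int (List Int)) (p : List Int)
    (h : GoodPath d p) : p.length ≤ d.keys.length :=
  (List.Nodup.subperm h.1 h.2.1).length_le

theorem loop_iff (d : PySem.Dict Int (List Int)) (u v l : Int) (m : Nat) :
    ∀ (s : Nat), 1 ≤ s → d.keys.length + 1 - s = m →
      ∀ f, FInv d u s f →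
        (bfs_loop d v l (PySem.List.pyRange (s : Int) ((d.keys.length : Int) + 1) 1) f = true ↔
          ∃ p, GoodPath d p ∧ p.head? = some u ∧ p.getLast? = some v ∧
            l < (p.length : Int) ∧ s ≤ p.length) := by
  induction m with
  | zero =>
      intro s hs hm f hf
      rw [PySem.List.pyRange_one_eq_nil (by omega)]
      unfold bfs_loop
      constructor
      · intro h; simp at h
      · rintro ⟨p, hgood, -, -, -, hge⟩
        have := goodpath_length_le d p hgood
        omega
  | succ m ih =>
      intro s hs hm f hf
      rw [PySem.List.pyRange_one_cons (by omega)]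
      unfold bfs_loop
      by_cases hc : (decide ((s : Int) > l) && f.any fun p => PySem.List.pyGetD p (-1) 0 == v) = true
      · rw [if_pos hc]
        simp only [Bool.and_eq_true, decide_eq_true_eq, List.any_eq_true, beq_iff_eq] at hc
        obtain ⟨hsl, p, hp, hpv⟩ := hc
        obtain ⟨hgood, hu, hlen⟩ := (hf p).mp hp
        have hpne : p ≠ [] := by intro hc; rw [hc] at hlen; simp at hlen; omega
        rw [PySem.List.pyGetD_neg_one _ _ hpne] at hpv
        simp only [true_iff]
        exact ⟨p, hgood, hu, by rw [List.getLast?_eq_some_getLast hpne, hpv],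
          by omega, by omega⟩
      · rw [if_neg hc]
        rw [show ((s : Int) + 1) = ((s + 1 : Nat) : Int) by push_cast; ring]
        rw [ih (s + 1) (by omega) (by omega) _ (step_inv d u s hs f hf)]
        constructor
        · rintro ⟨p, h1, h2, h3, h4, h5⟩
          exact ⟨p, h1, h2, h3, h4, by omega⟩
        · rintro ⟨p, h1, h2, h3, h4, h5⟩
          refine ⟨p, h1, h2, h3, h4, ?_⟩
          rcases Nat.lt_or_ge s p.length with h | h
          · omega
          · exfalso
            have hlen : p.length = s := by omega
            apply hc
            simp only [Bool.and_eq_true, decide_eq_true_eq, List.any_eq_true, beq_iff_eq]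
            have hpne : p ≠ [] := by intro hc2; rw [hc2] at hlen; simp at hlen; omega
            refine ⟨by omega, p, (hf p).mpr ⟨h1, h2, hlen⟩, ?_⟩
            rw [PySem.List.pyGetD_neg_one _ _ hpne]
            rw [List.getLast?_eq_some_getLast hpne] at h3
            simpa using h3

theorem B_iff (G : List (Int × List Int)) (u v l : Int) (hl : 1 ≤ l) :
    long_and_simple_decision_alt G u v l = true ↔
      ∃ p, GoodPath (PySem.Dict.ofList G) p ∧ p.head? = some u ∧ p.getLast? = some v ∧
        l < (p.length : Int) := by
  unfold long_and_simple_decision_alt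
  set d := PySem.Dict.ofList G with hd
  by_cases hu : d.contains u = true
  · rw [if_neg (by simp [hu]; omega)]
    have hsz : d.size = d.keys.length := by
      simp [PySem.Dict.size, PySem.Dict.keys]
    rw [hsz]
    have hinv : FInv d u 1 [[u]] := by
      intro p
      simp only [List.mem_singleton]
      constructor
      · rintro rfl
        exact ⟨⟨by simp, by
            intro z hz
            rw [List.mem_singleton] at hz
            exact hz ▸ (PySem.Dict.contains_iff_mem_keys _ _).mp hu,
          List.isChain_singleton u⟩, rfl, rfl⟩
      · rintro ⟨-, hh, hlen⟩
        match p, hlen with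
        | [a], _ => simp_all
    have hloop := loop_iff d u v l (d.keys.length + 1 - 1) 1 (by omega) rfl _ hinv
    simp only [Nat.cast_one] at hloop
    rw [hloop]
    constructor
    · rintro ⟨p, h1, h2, h3, h4, -⟩
      exact ⟨p, h1, h2, h3, h4⟩
    · rintro ⟨p, h1, h2, h3, h4⟩
      refine ⟨p, h1, h2, h3, h4, ?_⟩
      cases p with
      | nil => simp at h2
      | cons a q => simp
  · rw [if_pos (by simp [hu])]
    constructor
    · intro h; simp at h
    rintro ⟨p, ⟨-, hsub, -⟩, hh, -, -⟩
    cases p with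
    | nil => simp at hh
    | cons a q =>
      simp only [List.head?_cons, Option.some_inj] at hh
      subst hh
      exact absurd ((PySem.Dict.contains_iff_mem_keys _ _).mpr (hsub a List.mem_cons_self)) hu

-- ===== VERDICT (by name: the statement is the Claim_ definition above) =====
theorem long_and_simple_decision_spec : Claim_equal_long_and_simple_decision := by
  intro G u v l _ hpre
  unfold Spec_long_and_simple_decision
  by_cases h0 : l = 0
  · subst h0
    simp [long_and_simple_decision, long_and_simple_decision_alt]
  · have hl : 1 ≤ l := by unfold Pre_long_and_simple_decision at hpre; omega
    have := (A_iff G u v l hl).trans (B_iff G u v l hl).symm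
    cases ha : long_and_simple_decision G u v l <;>
      cases hb : long_and_simple_decision_alt G u v l <;> simp_all
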